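-- pv_equiv track=rewrite | github.com/imjuyongp/Data-Crawling | practice/week02/ps-10.py | solution
-- ===== SOURCE A (Python) =====
-- def solution(N, M):
--   days = 0
--   while(N > 0):
--     days += 1
--     if(days % M == 0):
--       N += 1
--     N -= 1
--   return days
-- ===== SOURCE B (Python) =====
-- def solution(N, M):
--   if N <= 0:
--     return 0
--   m = abs(M)
--   q, r = divmod(N - 1, m - 1)
--   return q * m + r + 1
-- ===== Notes on version B (the rewrite author's own statement) =====
-- stated objective: faster
-- what changed: replaced the O(N) day-by-day simulation with closed-form block arithmetic: every |M| days undo exactly one net decrement, so N decays by |M|-1 per block and the answer is divmod(N-1, |M|-1).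
import Mathlib
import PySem

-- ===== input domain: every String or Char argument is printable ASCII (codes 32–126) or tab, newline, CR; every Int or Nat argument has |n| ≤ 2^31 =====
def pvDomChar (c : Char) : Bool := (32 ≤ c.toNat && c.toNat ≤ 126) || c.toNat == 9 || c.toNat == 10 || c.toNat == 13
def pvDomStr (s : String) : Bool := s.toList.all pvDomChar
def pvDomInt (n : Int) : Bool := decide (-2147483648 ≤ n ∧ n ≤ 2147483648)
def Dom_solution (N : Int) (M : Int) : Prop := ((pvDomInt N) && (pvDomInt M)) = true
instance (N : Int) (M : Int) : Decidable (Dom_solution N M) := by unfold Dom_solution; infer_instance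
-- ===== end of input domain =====

-- B replaces A's O(N) day-by-day decay simulation by O(1) closed-form block arithmetic
-- (every |M| days reduce N by |M|-1): asymptotically faster.

-- ===== PORT A =====
-- A's while-loop as fuel recursion over the same state (N, days); fuel (2*N).toNat
-- suffices under Pre_solution (proved below), so the port equals Python A there.
def solLoop (M : Int) : Nat → Int → Int → Int
  | 0, _, days => days
  | fuel + 1, N, days =>
    if N > 0 then
      let days' := days + 1
      let N' := if PySem.Int.mod days' M = 0 then N + 1 else N
      solLoop M fuel (N' - 1) days'
    else days

def solution (N : Int) (M : Int) : Int := solLoop M (2 * N).toNat N 0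

-- ===== PORT B =====
def solution_alt (N : Int) (M : Int) : Int :=
  if N ≤ 0 then 0
  else
    let m : Int := |M|
    let q := PySem.Int.floordiv (N - 1) (m - 1)
    let r := PySem.Int.mod (N - 1) (m - 1)
    q * m + r + 1

-- ===== PRECONDITION & SPEC =====
-- Pre_ excludes only inputs on which A never returns: with N > 0 and M = 0 A raises
-- ZeroDivisionError on the first day, and with N > 0 and M = ±1 the loop never ends.
def Pre_solution (N : Int) (M : Int) : Prop := N ≤ 0 ∨ 2 ≤ |M|
instance (N : Int) (M : Int) : Decidable (Pre_solution N M) := by unfold Pre_solution; infer_instance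
def pvWitness_solution : Int × Int := (5, 3)

def Spec_solution (N : Int) (M : Int) (out : Int) : Prop := out = solution_alt N M
instance (N : Int) (M : Int) (out : Int) : Decidable (Spec_solution N M out) := by unfold Spec_solution; infer_instance

-- ===== CLAIM (what is proved, stated in full; the proofs are below) =====
def Claim_equal_solution : Prop := ∀ (N : Int) (M : Int), Dom_solution N M → Pre_solution N M → Spec_solution N M (solution N M)

-- ===== LEMMAS AND PROOFS =====

-- (d+1)/m is d/m, plus one exactly when m divides d+1.
lemma ediv_succ (m d : Int) (hm : 0 < m) :
    (d + 1) / m = d / m + (if m ∣ (d + 1) then 1 else 0) := by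
  have hne : m ≠ 0 := hm.ne'
  have hb0 : 0 ≤ d % m := Int.emod_nonneg d hne
  have hb1 : d % m < m := Int.emod_lt_of_pos d hm
  have hd : m * (d / m) + d % m = d := Int.ediv_add_emod d m
  have hrw : d + 1 = (d % m + 1) + (d / m) * m := by linarith [hd]
  have hdivrw : (d + 1) / m = (d % m + 1) / m + d / m := by
    rw [hrw, Int.add_mul_ediv_right _ _ hne]
  have hdvd : m ∣ (d + 1) ↔ d % m + 1 = m := by
    constructor
    · intro h
      have h2 : m ∣ (d % m + 1) := by
        have : d % m + 1 = (d + 1) - (d / m) * m := by linarith [hd]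
        rw [this]
        exact dvd_sub h (Dvd.intro_left _ rfl)
      have := Int.le_of_dvd (by omega) h2
      omega
    · intro h
      rw [hrw, h]
      exact Dvd.dvd.add (Dvd.intro 1 (by ring)) (Dvd.intro_left _ rfl)
  by_cases h : m ∣ (d + 1)
  · have he : d % m + 1 = m := hdvd.mp h
    simp only [h, if_pos]
    rw [hdivrw, he, Int.ediv_self hne]
    ring
  · have hne2 : d % m + 1 ≠ m := fun he => h (hdvd.mpr he)
    simp only [h, if_false]
    rw [hdivrw, Int.ediv_eq_zero_of_lt (by omega) (by omega)]
    ring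

-- d ↦ d - d/m is monotone for positive m.
lemma f_mono (m : Int) (hm : 0 < m) {d e : Int} (h : d ≤ e) :
    d - d / m ≤ e - e / m := by
  have hne : m ≠ 0 := hm.ne'
  have h1 : e ≤ d + (e - d) * m := by nlinarith
  have h2 : e / m ≤ (d + (e - d) * m) / m := Int.ediv_le_ediv hm h1
  rw [Int.add_mul_ediv_right _ _ hne] at h2
  omega

-- The loop, started at day d with N₀ - (d - d/|M|) lives remaining, ends on day `ans`.
lemma loop_run (M : Int) (hm : 2 ≤ |M|) (N₀ ans : Int)
    (h_end : ans - ans / |M| = N₀)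
    (h_mid : ∀ d, 0 ≤ d → d < ans → d - d / |M| < N₀) :
    ∀ (fuel : Nat) (d : Int), 0 ≤ d → d ≤ ans → (ans - d).toNat ≤ fuel →
      solLoop M fuel (N₀ - (d - d / |M|)) d = ans := by
  have hm0 : (0 : Int) < |M| := by omega
  intro fuel
  induction fuel with
  | zero =>
    intro d hd0 hdle hfuel
    have : d = ans := by omega
    simp [solLoop, this]
  | succ fuel ih =>
    intro d hd0 hdle hfuel
    by_cases hda : d = ans
    · subst hda
      have hN0 : N₀ - (d - d / |M|) = 0 := by omega
      simp [solLoop, hN0]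
    · have hdlt : d < ans := lt_of_le_of_ne hdle hda
      have hNpos : 0 < N₀ - (d - d / |M|) := by
        have := h_mid d hd0 hdlt
        omega
      have hcond : (PySem.Int.mod (d + 1) M = 0) ↔ (|M| ∣ (d + 1)) := by
        rw [PySem.Int.mod_eq_zero_iff_dvd, abs_dvd]
      have hstep := ediv_succ (|M|) d hm0
      show solLoop M (fuel + 1) (N₀ - (d - d / |M|)) d = ans
      rw [solLoop]
      rw [if_pos hNpos]
      by_cases hdvd : |M| ∣ (d + 1)
      · have hc : PySem.Int.mod (d + 1) M = 0 := hcond.mpr hdvd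
        simp only [hc, if_pos]
        have harg : N₀ - (d - d / |M|) + 1 - 1 = N₀ - ((d + 1) - (d + 1) / |M|) := by
          rw [hstep]; simp [hdvd]
        rw [harg]
        exact ih (d + 1) (by omega) (by omega) (by omega)
      · have hc : ¬ (PySem.Int.mod (d + 1) M = 0) := fun h => hdvd (hcond.mp h)
        simp only [hc, if_false]
        have harg : N₀ - (d - d / |M|) - 1 = N₀ - ((d + 1) - (d + 1) / |M|) := by
          rw [hstep]; simp [hdvd]; ring
        rw [harg]
        exact ih (d + 1) (by omega) (by omega) (by omega)

-- ===== VERDICT (by name: the statement is the Claim_ definition above) =====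
theorem solution_spec : Claim_equal_solution := by
  intro N M _hdom hpre
  unfold Spec_solution
  by_cases hN : N ≤ 0
  · have hfuel : (2 * N).toNat = 0 := by omega
    simp [solution, solution_alt, hfuel, hN, solLoop]
  · push_neg at hN
    have hm : 2 ≤ |M| := by
      cases hpre with
      | inl h => omega
      | inr h => exact h
    have hm0 : (0 : Int) < |M| := by omega
    have hm1 : (0 : Int) < |M| - 1 := by omega
    set m : Int := |M| with hmdef
    set q : Int := (N - 1) / (m - 1) with hq
    set r : Int := (N - 1) % (m - 1) with hr
    have hr0 : 0 ≤ r := Int.emod_nonneg _ (by omega)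
    have hr1 : r < m - 1 := Int.emod_lt_of_pos _ hm1
    have hq0 : 0 ≤ q := Int.ediv_nonneg (by omega) (by omega)
    have hqr : (m - 1) * q + r = N - 1 := Int.ediv_add_emod (N - 1) (m - 1)
    have halt : solution_alt N M = q * m + r + 1 := by
      simp only [solution_alt, if_neg (by omega : ¬ N ≤ 0)]
      rw [PySem.Int.floordiv_eq_ediv_of_pos (by omega), PySem.Int.mod_eq_emod_of_pos (by omega)]
    set ans : Int := q * m + r + 1 with hans
    -- key division facts about ans and ans - 1
    have hdiv_ans : ans / m = q := by
      have h1 : ans = (r + 1) + q * m := by ring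
      rw [h1, Int.add_mul_ediv_right _ _ (by omega : m ≠ 0),
        Int.ediv_eq_zero_of_lt (by omega) (by omega)]
      ring
    have hdiv_ans1 : (ans - 1) / m = q := by
      have h1 : ans - 1 = r + q * m := by ring
      rw [h1, Int.add_mul_ediv_right _ _ (by omega : m ≠ 0),
        Int.ediv_eq_zero_of_lt (by omega) (by omega)]
      ring
    have h_end : ans - ans / m = N := by
      rw [hdiv_ans]
      have : ans - q = (m - 1) * q + r + 1 := by ring
      omega
    have h_mid : ∀ d, 0 ≤ d → d < ans → d - d / m < N := by
      intro d hd0 hdlt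
      have h1 : d - d / m ≤ (ans - 1) - (ans - 1) / m := f_mono m hm0 (by omega)
      rw [hdiv_ans1] at h1
      have h2 : ans - 1 - q = (m - 1) * q + r := by ring
      omega
    have hans1 : 1 ≤ ans := by nlinarith
    have hansle : ans ≤ 2 * N := by
      have hqle : q ≤ (m - 1) * q := by nlinarith
      have : ans = (m - 1) * q + r + 1 + q := by ring
      omega
    have hzero : N - ((0 : Int) - (0 : Int) / m) = N := by simp
    have := loop_run M hm N ans h_end h_mid (2 * N).toNat 0 le_rfl (by omega) (by omega)
    rw [hzero] at this
    rw [halt, solution, this]
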